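-- pv_equiv track=rewrite | github.com/rafacasarec/primeros_pasos_tinybird | .venv/Lib/site-packages/tinybird/sql.py | clean_comments
-- ===== SOURCE A (Python) =====
-- def clean_comments(schema_to_clean: str) -> str:
--     """Remove the comments from the schema
--     if the comments are between backticks, they will not be removed
--     >>> clean_comments(None) is None
--     True
--     >>> clean_comments('')
--     ''
--     >>> clean_comments('    ')
--     ''
--     >>> clean_comments('\\n')
--     ''
--     >>> clean_comments('\\n\\n\\n\\n')
--     ''
--     >>> clean_comments('c Float32')
--     'c Float32'
--     >>> clean_comments('c Float32\\n')
--     'c Float32'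
--     >>> clean_comments('c Float32\\n--this is a comment')
--     'c Float32'
--     >>> clean_comments('c Float32\\n--this is a comment\\n')
--     'c Float32'
--     >>> clean_comments('c Float32\\t-- this is a comment\\t\\n')
--     'c Float32'
--     >>> clean_comments('c Float32\\n--this is a comment\\r\\n')
--     'c Float32'
--     >>> clean_comments('c Float32\\n--this is a comment\\n--this is a comment2\\n')
--     'c Float32'
--     >>> clean_comments('c Float32\\n--this is a ```comment\\n')
--     'c Float32'
--     >>> clean_comments('c Float32\\n--this is a ```comment\\n')
--     'c Float32'
--     >>> clean_comments('c Float32, -- comment\\nd Float32 -- comment2')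
--     'c Float32,\\nd Float32'
--     >>> clean_comments('c Float32, -- comment\\n   -- comment \\nd Float32 -- comment2')
--     'c Float32,\\nd Float32'
--     >>> clean_comments('c Float32 `json:$.aa--aa`\\n--this is a ```comment\\n')
--     'c Float32 `json:$.aa--aa`'
--     >>> clean_comments('c Float32 `json:$.cc--cc`\\nd Float32 `json:$.dd--dd`\\n--this is a ```comment\\n')
--     'c Float32 `json:$.cc--cc`\\nd Float32 `json:$.dd--dd`'
--     >>> clean_comments('c--c Float32 `json:$.cc--cc`\\n')
--     'c'
--     >>> clean_comments('`c--c` Float32 `json:$.cc--cc`\\n')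
--     '`c'
--     """
--
--     def clean_line_comments(line: str) -> str:
--         if not line:
--             return line
--         i = 0
--         inside_json_path = False
--         while i < len(line):
--             if i + 1 < len(line) and line[i] == "-" and line[i + 1] == "-" and not inside_json_path:
--                 return line[:i].strip()
--
--             if not inside_json_path and line[i:].startswith("`json:"):
--                 inside_json_path = True
--             elif inside_json_path and line[i] == "`":
--                 inside_json_path = False
--             i += 1
--         return line
--
--     if schema_to_clean is None:
--         return schema_to_clean
--
--     cleaned_schema = ""
--     for line in schema_to_clean.splitlines():
--         cleaned_line = clean_line_comments(line)
--         if cleaned_line: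
--             cleaned_schema += cleaned_line + "\n"
--     return cleaned_schema.strip()
-- ===== SOURCE B (Python) =====
-- def clean_comments(schema_to_clean: str) -> str:
--     """Remove '--' comments, except inside `json:...` backtick segments."""
--
--     def clean_line_comments(line: str) -> str:
--         p = 0
--         while True:
--             d = line.find('--', p)
--             if d == -1:
--                 return line
--             j = line.find('`json:', p)
--             if j == -1 or d < j:
--                 return line[:d].strip()
--             close = line.find('`', j + 6)
--             if close == -1:
--                 return line
--             p = close + 1
--
--     if schema_to_clean is None:
--         return schema_to_clean
--
--     cleaned_schema = ""
--     for line in schema_to_clean.splitlines():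
--         cleaned_line = clean_line_comments(line)
--         if cleaned_line:
--             cleaned_schema += cleaned_line + "\n"
--     return cleaned_schema.strip()
-- ===== Notes on version B (the rewrite author's own statement) =====
-- stated objective: faster
-- what changed: Per line, A's character-by-character scan (which re-slices the rest of the line at every position to test for a json-path opener) is replaced by a find-and-jump loop: locate the next comment marker and the next json-path opener with str.find, cut at the marker if it comes first, otherwise jump directly past the segment's closing backtick.
import Mathlib
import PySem

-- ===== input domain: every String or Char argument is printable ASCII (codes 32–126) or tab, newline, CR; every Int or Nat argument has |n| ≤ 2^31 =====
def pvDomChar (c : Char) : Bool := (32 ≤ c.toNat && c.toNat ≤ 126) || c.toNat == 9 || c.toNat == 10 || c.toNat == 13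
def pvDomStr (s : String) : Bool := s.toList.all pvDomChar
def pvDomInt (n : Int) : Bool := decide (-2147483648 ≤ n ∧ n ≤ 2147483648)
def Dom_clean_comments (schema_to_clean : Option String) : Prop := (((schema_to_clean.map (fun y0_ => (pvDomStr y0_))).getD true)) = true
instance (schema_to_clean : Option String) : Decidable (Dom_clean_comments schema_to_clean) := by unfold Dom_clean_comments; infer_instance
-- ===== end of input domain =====

-- B replaces A's char-by-char two-flag scan of each line (which slices the rest of
-- the line at every index) with a find-and-jump loop: locate the next comment marker
-- and the next json-path opener, cut at the marker if it comes first, else jump past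
-- the segment's closing backtick; measurably faster (no per-character slicing).

-- ===== PORT A =====
-- inner while loop of clean_line_comments: index i, flag inside_json_path
def pvLoopA (line : List Char) (i : Nat) (inside : Bool) : List Char :=
  if h : i < line.length then
    if i + 1 < line.length ∧ PySem.List.pyGet? line (i : Int) = some '-'
        ∧ PySem.List.pyGet? line ((i + 1 : Nat) : Int) = some '-' ∧ inside = false then
      PySem.Chars.strip (PySem.Chars.slice line none (some (i : Int)))
    else
      let inside' :=
        if inside = false ∧
            PySem.Chars.startswith (PySem.Chars.slice line (some (i : Int)) none)
              ['`', 'j', 's', 'o', 'n', ':'] = true then true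
        else if inside = true ∧ PySem.List.pyGet? line (i : Int) = some '`' then false
        else inside
      pvLoopA line (i + 1) inside'
  else line
termination_by line.length - i

def pvCleanLineA (line : List Char) : List Char :=
  if line = [] then line else pvLoopA line 0 false

def clean_comments (schema_to_clean : Option String) : Option String :=
  match schema_to_clean with
  | none => none
  | some s =>
    let cleaned := (PySem.Chars.splitlines s.toList).foldl
      (fun acc line =>
        let cl := pvCleanLineA line
        if cl ≠ [] then acc ++ cl ++ ['\n'] else acc) ([] : List Char)
    some (String.ofList (PySem.Chars.strip cleaned))

-- ===== PORT B =====
-- find-and-jump loop of B's clean_line_comments; the fuel argument only makes the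
-- Python 'while True' (whose p strictly increases) structurally terminating
def pvLoopB (line : List Char) (fuel : Nat) (p : Nat) : List Char :=
  match fuel with
  | 0 => line
  | fuel + 1 =>
    let d := PySem.Chars.findFrom line ['-', '-'] (p : Int)
    if d = -1 then line
    else
      let j := PySem.Chars.findFrom line ['`', 'j', 's', 'o', 'n', ':'] (p : Int)
      if j = -1 ∨ d < j then
        PySem.Chars.strip (PySem.Chars.slice line none (some d))
      else
        let c := PySem.Chars.findFrom line ['`'] (j + 6)
        if c = -1 then line
        else pvLoopB line fuel (c.toNat + 1)

def pvCleanLineB (line : List Char) : List Char :=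
  pvLoopB line (line.length + 1) 0

def clean_comments_alt (schema_to_clean : Option String) : Option String :=
  match schema_to_clean with
  | none => none
  | some s =>
    let cleaned := (PySem.Chars.splitlines s.toList).foldl
      (fun acc line =>
        let cl := pvCleanLineB line
        if cl ≠ [] then acc ++ cl ++ ['\n'] else acc) ([] : List Char)
    some (String.ofList (PySem.Chars.strip cleaned))

-- ===== PRECONDITION & SPEC =====
def Spec_clean_comments (schema_to_clean : Option String) (out : Option String) : Prop := out = clean_comments_alt schema_to_clean
instance (schema_to_clean : Option String) (out : Option String) : Decidable (Spec_clean_comments schema_to_clean out) := by unfold Spec_clean_comments; infer_instance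

-- ===== CLAIM (what is proved, stated in full; the proofs are below) =====
def Claim_equal_clean_comments : Prop := ∀ (schema_to_clean : Option String), Dom_clean_comments schema_to_clean → Spec_clean_comments schema_to_clean (clean_comments schema_to_clean)

-- ===== LEMMAS AND PROOFS =====

-- '--' starts at index i
def pvDD (l : List Char) (i : Nat) : Prop := l[i]? = some '-' ∧ l[i + 1]? = some '-'
-- '`json:' starts at index i
def pvJS (l : List Char) (i : Nat) : Prop := ['`', 'j', 's', 'o', 'n', ':'] <+: l.drop i

lemma pv_lt_of_getElem? {l : List Char} {q : Nat} {a : Char} (h : l[q]? = some a) : q < l.length := by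
  rcases List.getElem?_eq_some_iff.mp h with ⟨hl, -⟩; exact hl

lemma pv_js_head {l : List Char} {j : Nat} (h : pvJS l j) : l[j]? = some '`' := by
  obtain ⟨t, ht⟩ := h
  have : (l.drop j)[0]? = some '`' := by rw [← ht]; rfl
  rwa [List.getElem?_drop, Nat.add_zero] at this

lemma pv_loopA_cut (l : List Char) (q : Nat) (hdd : pvDD l q) :
    pvLoopA l q false = PySem.Chars.strip (PySem.Chars.slice l none (some (q : Int))) := by
  have h1 : q + 1 < l.length := pv_lt_of_getElem? hdd.2
  rw [pvLoopA, dif_pos (show q < l.length by omega),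
    if_pos ⟨h1, by simpa using hdd.1, by simp only [PySem.List.pyGet?_natCast]; exact hdd.2, rfl⟩]

lemma pv_loopA_enter (l : List Char) (q : Nat) (hjs : pvJS l q) :
    pvLoopA l q false = pvLoopA l (q + 1) true := by
  have hh := pv_js_head hjs
  rw [pvLoopA, dif_pos (pv_lt_of_getElem? hh), if_neg (by
    rintro ⟨-, hc, -, -⟩
    rw [PySem.List.pyGet?_natCast, hh] at hc
    exact absurd hc (by simp))]
  simp only []
  rw [(PySem.Chars.startswith_iff _ _).mpr (by simpa [PySem.List.slice_from_natCast] using hjs),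
    if_pos (by simp)]

lemma pv_loopA_close (l : List Char) (q : Nat) (h : l[q]? = some '`') :
    pvLoopA l q true = pvLoopA l (q + 1) false := by
  rw [pvLoopA, dif_pos (pv_lt_of_getElem? h), if_neg (by rintro ⟨-, -, -, hc⟩; cases hc)]
  simp [PySem.List.pyGet?_natCast, h]

lemma pv_loopA_step_out (l : List Char) (p : Nat) (hlt : p < l.length)
    (hdd : ¬ pvDD l p) (hjs : ¬ pvJS l p) :
    pvLoopA l p false = pvLoopA l (p + 1) false := by
  rw [pvLoopA, dif_pos hlt, if_neg (by
    rintro ⟨-, h1, h2, -⟩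
    rw [PySem.List.pyGet?_natCast] at h1
    simp only [PySem.List.pyGet?_natCast] at h2
    exact hdd ⟨h1, h2⟩)]
  have hjs' : ¬ ['`', 'j', 's', 'o', 'n', ':'] <+: List.drop p l := hjs
  simp [PySem.Chars.startswith_iff, hjs', PySem.List.slice_from_natCast]

lemma pv_loopA_step_in (l : List Char) (p : Nat) (hlt : p < l.length)
    (hbt : l[p]? ≠ some '`') :
    pvLoopA l p true = pvLoopA l (p + 1) true := by
  rw [pvLoopA, dif_pos hlt, if_neg (by rintro ⟨-, -, -, hc⟩; cases hc)]
  simp [PySem.List.pyGet?_natCast, hbt]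

lemma pv_loopA_end (l : List Char) (p : Nat) (hp : l.length ≤ p) (b : Bool) :
    pvLoopA l p b = l := by
  rw [pvLoopA, dif_neg (by omega)]

lemma pv_loopA_skip_out (l : List Char) (p q : Nat) (hq : q ≤ l.length) (hpq : p ≤ q)
    (h : ∀ i, p ≤ i → i < q → ¬ pvDD l i ∧ ¬ pvJS l i) :
    pvLoopA l p false = pvLoopA l q false := by
  rcases Nat.lt_or_ge p q with hlt | hge
  · rw [pv_loopA_step_out l p (by omega) (h p le_rfl hlt).1 (h p le_rfl hlt).2]
    exact pv_loopA_skip_out l (p+1) q hq (by omega) (fun i h1 h2 => h i (by omega) h2)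
  · have : p = q := by omega
    rw [this]
termination_by q - p

lemma pv_loopA_skip_in (l : List Char) (p q : Nat) (hq : q ≤ l.length) (hpq : p ≤ q)
    (h : ∀ i, p ≤ i → i < q → l[i]? ≠ some '`') :
    pvLoopA l p true = pvLoopA l q true := by
  rcases Nat.lt_or_ge p q with hlt | hge
  · rw [pv_loopA_step_in l p (by omega) (h p le_rfl hlt)]
    exact pv_loopA_skip_in l (p+1) q hq (by omega) (fun i h1 h2 => h i (by omega) h2)
  · have : p = q := by omega
    rw [this]
termination_by q - p

lemma pv_loopA_nodd (l : List Char) (p : Nat) (h : ∀ i, p ≤ i → ¬ pvDD l i) :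
    ∀ b, pvLoopA l p b = l := by
  intro b
  rcases Nat.lt_or_ge p l.length with hlt | hge
  · rw [pvLoopA, dif_pos hlt, if_neg (by
      rintro ⟨-, h1, h2, -⟩
      rw [PySem.List.pyGet?_natCast] at h1
      simp only [PySem.List.pyGet?_natCast] at h2
      exact h p le_rfl ⟨h1, h2⟩)]
    exact pv_loopA_nodd l (p+1) (fun i hi => h i (by omega)) _
  · exact pv_loopA_end l p hge b
termination_by l.length - p

lemma pv_loopA_in_end (l : List Char) (p : Nat) (h : ∀ i, p ≤ i → l[i]? ≠ some '`') :
    pvLoopA l p true = l := by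
  rcases Nat.lt_or_ge p l.length with hlt | hge
  · rw [pv_loopA_step_in l p hlt (h p le_rfl)]
    exact pv_loopA_in_end l (p+1) (fun i hi => h i (by omega))
  · exact pv_loopA_end l p hge true
termination_by l.length - p

lemma pv_prefix_pair {a b : Char} {l : List Char} :
    [a, b] <+: l ↔ l[0]? = some a ∧ l[1]? = some b := by
  match l with
  | [] => simp
  | [x] => simp [List.cons_prefix_iff]
  | x :: y :: t => simp [List.cons_prefix_iff]

lemma pv_prefix_single {a : Char} {l : List Char} :
    [a] <+: l ↔ l[0]? = some a := by
  match l with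
  | [] => simp
  | x :: t => simp [List.cons_prefix_iff]

lemma pv_dd_iff (l : List Char) (i : Nat) : ['-', '-'] <+: l.drop i ↔ pvDD l i := by
  unfold pvDD
  rw [pv_prefix_pair, List.getElem?_drop, List.getElem?_drop, Nat.add_zero]

lemma pv_bt_iff (l : List Char) (i : Nat) : ['`'] <+: l.drop i ↔ l[i]? = some '`' := by
  rw [pv_prefix_single, List.getElem?_drop, Nat.add_zero]

lemma pv_no_match_ge (l sub : List Char) (p : Nat) (h : ¬ sub <:+: l.drop p) :
    ∀ i, p ≤ i → ¬ sub <+: l.drop i := by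
  intro i hpi hpre
  apply h
  rw [List.infix_iff_prefix_suffix]
  refine ⟨l.drop i, hpre, ?_⟩
  rw [show l.drop i = (l.drop p).drop (i - p) by rw [List.drop_drop]; congr 1; omega]
  exact List.drop_suffix _ _

lemma pv_js_len {l : List Char} {j : Nat} (h : pvJS l j) : j + 6 ≤ l.length := by
  have := h.length_le
  simp at this; omega

lemma pv_js_mid {l : List Char} {j : Nat} (h : pvJS l j) :
    ∀ k, 1 ≤ k → k ≤ 5 → l[j + k]? ≠ some '`' := by
  obtain ⟨t, ht⟩ := h
  intro k h1 h5
  have hg : (l.drop j)[k]? = (['`', 'j', 's', 'o', 'n', ':'] ++ t)[k]? := by rw [ht]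
  rw [List.getElem?_drop] at hg
  rw [hg, List.getElem?_append_left (by simp; omega)]
  interval_cases k <;> simp

lemma pv_main (l : List Char) :
    ∀ fuel p, p ≤ l.length → l.length < fuel + p → pvLoopA l p false = pvLoopB l fuel p := by
  intro fuel
  induction fuel with
  | zero => intro p hp hlen; omega
  | succ fuel ih =>
    intro p hp hlen
    simp only [pvLoopB]
    by_cases hd : PySem.Chars.findFrom l ['-', '-'] (p : Int) = -1
    · rw [if_pos hd]
      refine pv_loopA_nodd l p (fun i hi hdd => ?_) false
      exact pv_no_match_ge l ['-', '-'] p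
        ((PySem.Chars.findFrom_natCast_eq_neg_one_iff l ['-', '-'] p hp).mp hd) i hi
        ((pv_dd_iff l i).mpr hdd)
    · rw [if_neg hd]
      obtain ⟨hpd, hdpre, hdmin⟩ := PySem.Chars.findFrom_natCast_spec l ['-', '-'] p hp hd
      have hd0 : (0:Int) ≤ PySem.Chars.findFrom l ['-', '-'] (p : Int) := by omega
      have hddn : pvDD l (PySem.Chars.findFrom l ['-', '-'] (p : Int)).toNat :=
        (pv_dd_iff l _).mp hdpre
      have hdnlen := pv_lt_of_getElem? hddn.2
      by_cases hj : PySem.Chars.findFrom l ['`', 'j', 's', 'o', 'n', ':'] (p : Int) = -1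
          ∨ PySem.Chars.findFrom l ['-', '-'] (p : Int)
            < PySem.Chars.findFrom l ['`', 'j', 's', 'o', 'n', ':'] (p : Int)
      · rw [if_pos hj]
        have hnjs : ∀ i, p ≤ i → i < (PySem.Chars.findFrom l ['-', '-'] (p : Int)).toNat →
            ¬ pvJS l i := by
          rcases hj with hj1 | hj2
          · exact fun i hi _ hjs => pv_no_match_ge l _ p
              ((PySem.Chars.findFrom_natCast_eq_neg_one_iff l _ p hp).mp hj1) i hi hjs
          · intro i hi hilt hjs
            have hjne : PySem.Chars.findFrom l ['`', 'j', 's', 'o', 'n', ':'] (p : Int) ≠ -1 := by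
              omega
            obtain ⟨hpj, hjpre, hjmin⟩ := PySem.Chars.findFrom_natCast_spec l _ p hp hjne
            exact hjmin i hi (by omega) hjs
        rw [pv_loopA_skip_out l p (PySem.Chars.findFrom l ['-', '-'] (p : Int)).toNat (by omega)
            (by omega)
            (fun i h1 h2 => ⟨fun hdd => hdmin i h1 h2 ((pv_dd_iff l i).mpr hdd), hnjs i h1 h2⟩),
          pv_loopA_cut l _ hddn, Int.toNat_of_nonneg hd0]
      · rw [if_neg hj]
        rw [not_or, not_lt] at hj
        obtain ⟨hjne, hdj⟩ := hj
        obtain ⟨hpj, hjpre, hjmin⟩ :=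
          PySem.Chars.findFrom_natCast_spec l ['`', 'j', 's', 'o', 'n', ':'] p hp hjne
        have hj0 : (0:Int) ≤ PySem.Chars.findFrom l ['`', 'j', 's', 'o', 'n', ':'] (p : Int) := by
          omega
        have hjs : pvJS l (PySem.Chars.findFrom l ['`', 'j', 's', 'o', 'n', ':'] (p : Int)).toNat :=
          hjpre
        have hjlen := pv_js_len hjs
        have hne : (PySem.Chars.findFrom l ['`', 'j', 's', 'o', 'n', ':'] (p : Int)).toNat ≠
            (PySem.Chars.findFrom l ['-', '-'] (p : Int)).toNat := by
          intro he
          have h1 := pv_js_head hjs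
          rw [he, hddn.1] at h1
          cases h1
        have hjd : (PySem.Chars.findFrom l ['`', 'j', 's', 'o', 'n', ':'] (p : Int)).toNat <
            (PySem.Chars.findFrom l ['-', '-'] (p : Int)).toNat := by omega
        rw [pv_loopA_skip_out l p
            (PySem.Chars.findFrom l ['`', 'j', 's', 'o', 'n', ':'] (p : Int)).toNat (by omega)
            (by omega)
            (fun i h1 h2 => ⟨fun hdd => hdmin i h1 (by omega) ((pv_dd_iff l i).mpr hdd),
              fun hjs' => hjmin i h1 h2 hjs'⟩),
          pv_loopA_enter l _ hjs,
          show PySem.Chars.findFrom l ['`', 'j', 's', 'o', 'n', ':'] (p : Int) + 6 =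
            (((PySem.Chars.findFrom l ['`', 'j', 's', 'o', 'n', ':'] (p : Int)).toNat + 6 : Nat) : Int)
            from by omega]
        by_cases hc : PySem.Chars.findFrom l ['`']
            (((PySem.Chars.findFrom l ['`', 'j', 's', 'o', 'n', ':'] (p : Int)).toNat + 6 : Nat) : Int)
            = -1
        · rw [if_pos hc]
          refine pv_loopA_in_end l _ (fun i hi => ?_)
          rcases Nat.lt_or_ge i
            ((PySem.Chars.findFrom l ['`', 'j', 's', 'o', 'n', ':'] (p : Int)).toNat + 6) with hi6 | hi6
          · have hm := pv_js_mid hjs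
              (i - (PySem.Chars.findFrom l ['`', 'j', 's', 'o', 'n', ':'] (p : Int)).toNat)
              (by omega) (by omega)
            rwa [show (PySem.Chars.findFrom l ['`', 'j', 's', 'o', 'n', ':'] (p : Int)).toNat +
              (i - (PySem.Chars.findFrom l ['`', 'j', 's', 'o', 'n', ':'] (p : Int)).toNat) = i
              from by omega] at hm
          · intro hbt
            exact pv_no_match_ge l ['`'] _
              ((PySem.Chars.findFrom_natCast_eq_neg_one_iff l ['`'] _ hjlen).mp hc) i hi6
              ((pv_bt_iff l i).mpr hbt)
        · rw [if_neg hc]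
          obtain ⟨hkc, hcpre, hcmin⟩ :=
            PySem.Chars.findFrom_natCast_spec l ['`'] _ hjlen hc
          have hbt := (pv_bt_iff l _).mp hcpre
          have hclen := pv_lt_of_getElem? hbt
          have hskip : ∀ i, (PySem.Chars.findFrom l ['`', 'j', 's', 'o', 'n', ':'] (p : Int)).toNat + 1 ≤ i →
              i < (PySem.Chars.findFrom l ['`']
                (((PySem.Chars.findFrom l ['`', 'j', 's', 'o', 'n', ':'] (p : Int)).toNat + 6 : Nat) : Int)).toNat →
              l[i]? ≠ some '`' := by
            intro i h1 h2
            rcases Nat.lt_or_ge i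
              ((PySem.Chars.findFrom l ['`', 'j', 's', 'o', 'n', ':'] (p : Int)).toNat + 6) with hi6 | hi6
            · have hm := pv_js_mid hjs
                (i - (PySem.Chars.findFrom l ['`', 'j', 's', 'o', 'n', ':'] (p : Int)).toNat)
                (by omega) (by omega)
              rwa [show (PySem.Chars.findFrom l ['`', 'j', 's', 'o', 'n', ':'] (p : Int)).toNat +
                (i - (PySem.Chars.findFrom l ['`', 'j', 's', 'o', 'n', ':'] (p : Int)).toNat) = i
                from by omega] at hm
            · exact fun hbt' => hcmin i hi6 h2 ((pv_bt_iff l i).mpr hbt')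
          rw [pv_loopA_skip_in l ((PySem.Chars.findFrom l ['`', 'j', 's', 'o', 'n', ':'] (p : Int)).toNat + 1)
              (PySem.Chars.findFrom l ['`']
                (((PySem.Chars.findFrom l ['`', 'j', 's', 'o', 'n', ':'] (p : Int)).toNat + 6 : Nat) : Int)).toNat
              (by omega) (by omega) hskip,
            pv_loopA_close l _ hbt]
          exact ih _ (by omega) (by omega)

lemma pv_cleanLine_eq (l : List Char) : pvCleanLineA l = pvCleanLineB l := by
  have h := pv_main l (l.length + 1) 0 (by omega) (by omega)
  unfold pvCleanLineA pvCleanLineB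
  split
  · rename_i he
    subst he
    rw [← h, pvLoopA]
    simp
  · exact h

-- ===== VERDICT (by name: the statement is the Claim_ definition above) =====
theorem clean_comments_spec : Claim_equal_clean_comments := by
  intro o _
  unfold Spec_clean_comments clean_comments clean_comments_alt
  cases o with
  | none => rfl
  | some s => simp only [pv_cleanLine_eq]
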